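-- pv_equiv track=rewrite | github.com/nexon33/voynich-grammar-analysis | scripts/analysis/validate_t_prefix_comprehensive.py | compare_with_at_in
-- ===== SOURCE A (Python) =====
-- from collections import Counter, defaultdict
--
-- def compare_with_at_in(translations):
--     """
--     Test 5: Compare T- with AT/IN preposition
--
--     If T- is grammaticalized AT/IN:
--     Should show similar distributions and contexts
--     """
--     t_contexts = []
--     at_contexts = []
--
--     for trans in translations:
--         sentence = trans["final_translation"]
--         words = sentence.split()
--
--         for i, word in enumerate(words):
--             if word.startswith("T-"):
--                 before = words[max(0, i - 2) : i]
--                 after = words[i + 1 : min(len(words), i + 3)]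
--                 t_contexts.append({"word": word, "before": before, "after": after})
--
--             if "AT/IN" in word or word == "AT-[?e]-VERB":
--                 before = words[max(0, i - 2) : i]
--                 after = words[i + 1 : min(len(words), i + 3)]
--                 at_contexts.append({"word": word, "before": before, "after": after})
--
--     # Find common patterns
--     t_after = Counter()
--     at_after = Counter()
--
--     for ctx in t_contexts:
--         t_after.update(ctx["after"])
--
--     for ctx in at_contexts:
--         at_after.update(ctx["after"])
--
--     return t_after, at_after, len(t_contexts), len(at_contexts)
-- ===== SOURCE B (Python) =====
-- from collections import Counter
--
-- def _is_t(w):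
--     return w.startswith("T-")
--
-- def _is_at(w):
--     return "AT/IN" in w or w == "AT-[?e]-VERB"
--
-- def compare_with_at_in(translations):
--     # Inverted "contribution" scan: instead of taking a forward after-window
--     # for every matching word, each word looks BACK at its two predecessors
--     # and is credited once per matching predecessor.
--     t_after = Counter()
--     at_after = Counter()
--     t_count = 0
--     at_count = 0
--     for trans in translations:
--         words = trans["final_translation"].split()
--         for j, w in enumerate(words):
--             t_count += _is_t(w)
--             at_count += _is_at(w)
--             window = words[max(0, j - 2):j]
--             m = sum(map(_is_t, window))
--             if m:
--                 t_after[w] += m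
--             m = sum(map(_is_at, window))
--             if m:
--                 at_after[w] += m
--     return t_after, at_after, t_count, at_count
-- ===== Notes on version B (the rewrite author's own statement) =====
-- stated objective: alternative
-- what changed: B inverts the data flow: instead of collecting a context record with a forward after-window for every matching word and then counting those windows in a second pass, B makes a single backward-looking scan in which each word credits itself to the Counter once per matching word among its two predecessors; the proof shows this position-ordered crediting yields exactly A's Counter contents and insertion order.
import Mathlib
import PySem

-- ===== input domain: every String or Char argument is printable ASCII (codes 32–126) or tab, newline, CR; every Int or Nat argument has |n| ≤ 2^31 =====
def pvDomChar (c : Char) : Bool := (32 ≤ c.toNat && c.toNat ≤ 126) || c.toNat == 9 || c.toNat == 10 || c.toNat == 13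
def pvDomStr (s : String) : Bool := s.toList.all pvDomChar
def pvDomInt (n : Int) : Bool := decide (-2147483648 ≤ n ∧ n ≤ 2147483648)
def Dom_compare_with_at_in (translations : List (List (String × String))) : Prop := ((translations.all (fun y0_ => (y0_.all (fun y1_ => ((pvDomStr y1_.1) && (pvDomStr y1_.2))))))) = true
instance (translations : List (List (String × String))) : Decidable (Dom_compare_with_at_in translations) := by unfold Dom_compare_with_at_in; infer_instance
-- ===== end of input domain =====

-- B replaces A's forward after-window collection (context records, then a counting pass) with a
-- single backward-looking scan: each word credits itself once per matching word among its two
-- predecessors. Objective: alternative (same cost, inverted data flow).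

-- ===== PORT A =====
def pvAfter (words : List String) (i : Int) : List String :=
  PySem.List.slice words (some (i + 1)) (some (min (words.length : Int) (i + 3)))

def pvBefore (words : List String) (i : Int) : List String :=
  PySem.List.slice words (some (max 0 (i - 2))) (some i)

def pvIsT (w : String) : Bool := PySem.Str.startswith w "T-"

def pvIsAt (w : String) : Bool := PySem.Str.isIn "AT/IN" w || (w == "AT-[?e]-VERB")

-- Counter.update(ws)
def pvBump (d : PySem.Dict String Int) (ws : List String) : PySem.Dict String Int :=
  ws.foldl (fun d w => d.modify w 0 (· + 1)) d

-- A's loop body over enumerate(words): append a context record {"word","before","after"} (a triple)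
def pvStepA (words : List String)
    (acc : List (String × List String × List String) × List (String × List String × List String))
    (iw : Int × String) :
    List (String × List String × List String) × List (String × List String × List String) :=
  let acc := if pvIsT iw.2 then
      (acc.1 ++ [(iw.2, pvBefore words iw.1, pvAfter words iw.1)], acc.2) else acc
  if pvIsAt iw.2 then
      (acc.1, acc.2 ++ [(iw.2, pvBefore words iw.1, pvAfter words iw.1)]) else acc

def pvTransA
    (acc : List (String × List String × List String) × List (String × List String × List String))
    (trans : List (String × String)) :
    List (String × List String × List String) × List (String × List String × List String) :=
  match (PySem.Dict.ofList trans).get? "final_translation" with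
  | none => acc   -- Python raises KeyError here; excluded by Pre_
  | some sentence => (PySem.List.enumerate (PySem.Str.split₀ sentence) 0).foldl (pvStepA (PySem.Str.split₀ sentence)) acc

def compare_with_at_in (translations : List (List (String × String))) :
    (List (String × Int)) × (List (String × Int)) × Int × Int :=
  let p := translations.foldl pvTransA ([], [])
  let t_after := p.1.foldl (fun d c => pvBump d c.2.2) PySem.Dict.empty
  let at_after := p.2.foldl (fun d c => pvBump d c.2.2) PySem.Dict.empty
  (t_after.items, at_after.items, (p.1.length : Int), (p.2.length : Int))

-- ===== PORT B =====
-- B's fused backward-looking loop body; words[max(0, j - 2):j] is the same slice expression as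
-- A's before-context, so the shared helper pvBefore is reused for it: state = (t_after, at_after, t_count, at_count);
-- sum(map(pred, window)) is ported as the count of window elements satisfying pred.
def pvStepB (words : List String)
    (st : PySem.Dict String Int × PySem.Dict String Int × Int × Int) (iw : Int × String) :
    PySem.Dict String Int × PySem.Dict String Int × Int × Int :=
  let st := (st.1, st.2.1, st.2.2.1 + (if pvIsT iw.2 then 1 else 0),
             st.2.2.2 + (if pvIsAt iw.2 then 1 else 0))
  let win := pvBefore words iw.1
  let mT : Int := ((win.countP pvIsT : Nat) : Int)
  let st := if mT = 0 then st else (st.1.modify iw.2 0 (· + mT), st.2.1, st.2.2.1, st.2.2.2)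
  let mA : Int := ((win.countP pvIsAt : Nat) : Int)
  if mA = 0 then st else (st.1, st.2.1.modify iw.2 0 (· + mA), st.2.2.1, st.2.2.2)

def pvTransB (st : PySem.Dict String Int × PySem.Dict String Int × Int × Int)
    (trans : List (String × String)) :
    PySem.Dict String Int × PySem.Dict String Int × Int × Int :=
  match (PySem.Dict.ofList trans).get? "final_translation" with
  | none => st   -- Python raises KeyError here; excluded by Pre_
  | some sentence => (PySem.List.enumerate (PySem.Str.split₀ sentence) 0).foldl (pvStepB (PySem.Str.split₀ sentence)) st

def compare_with_at_in_alt (translations : List (List (String × String))) :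
    (List (String × Int)) × (List (String × Int)) × Int × Int :=
  let st := translations.foldl pvTransB (PySem.Dict.empty, PySem.Dict.empty, 0, 0)
  (st.1.items, st.2.1.items, st.2.2.1, st.2.2.2)

-- ===== PRECONDITION & SPEC =====
-- Pre_ excludes exactly the inputs where trans["final_translation"] raises KeyError (both Pythons raise there).
def Pre_compare_with_at_in (translations : List (List (String × String))) : Prop :=
  ∀ trans ∈ translations, (PySem.Dict.ofList trans).contains "final_translation" = true

instance (translations : List (List (String × String))) : Decidable (Pre_compare_with_at_in translations) := by
  unfold Pre_compare_with_at_in; infer_instance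

def pvWitness_compare_with_at_in : (List (List (String × String))) :=
  [[("final_translation", "T-OX AT/IN KO")]]

def Spec_compare_with_at_in (translations : List (List (String × String)))
    (out : (List (String × Int)) × (List (String × Int)) × Int × Int) : Prop :=
  out = compare_with_at_in_alt translations

instance (translations : List (List (String × String))) (out : (List (String × Int)) × (List (String × Int)) × Int × Int) : Decidable (Spec_compare_with_at_in translations out) := by
  unfold Spec_compare_with_at_in; infer_instance

-- ===== CLAIM (what is proved, stated in full; the proofs are below) =====
def Claim_equal_compare_with_at_in : Prop := ∀ (translations : List (List (String × String))), Dom_compare_with_at_in translations → Pre_compare_with_at_in translations → Spec_compare_with_at_in translations (compare_with_at_in translations)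

-- ===== LEMMAS AND PROOFS =====

-- canonical per-sentence event stream: scanning positions left to right with p = "previous word
-- matches", q = "word before that matches", emit the current word once per matching predecessor
def pvEv (pred : String → Bool) (p q : Bool) : List String → List String
  | [] => []
  | w :: ws => (if q then [w] else []) ++ (if p then [w] else []) ++ pvEv pred (pred w) p ws

-- A's event stream: the flattened after-windows, in match order
def pvAfters (pred : String → Bool) : List String → List String
  | [] => []
  | w :: ws => (if pred w then ws.take 2 else []) ++ pvAfters pred ws

-- A's context records for the suffix starting at position k
def pvCtxs (pred : String → Bool) (all : List String) :
    Nat → List String → List (String × List String × List String)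
  | _, [] => []
  | k, w :: ws =>
      (if pred w then [(w, pvBefore all (k : Int), pvAfter all (k : Int))] else [])
        ++ pvCtxs pred all (k + 1) ws

-- does the last element of pre satisfy pred?
def pvFl (pred : String → Bool) (pre : List String) : Bool := (pre.getLast?.map pred).getD false

-- B's state as a function of A's context lists
def pvAbs (s : List (String × List String × List String) × List (String × List String × List String)) :
    PySem.Dict String Int × PySem.Dict String Int × Int × Int :=
  (s.1.foldl (fun d c => pvBump d c.2.2) PySem.Dict.empty,
   s.2.foldl (fun d c => pvBump d c.2.2) PySem.Dict.empty,
   (s.1.length : Int), (s.2.length : Int))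

theorem pvA_inner (all : List String) (suf : List String) : ∀ (k : Nat)
    (acc : List (String × List String × List String) × List (String × List String × List String)),
    (PySem.List.enumerate suf (k : Int)).foldl (pvStepA all) acc
      = (acc.1 ++ pvCtxs pvIsT all k suf, acc.2 ++ pvCtxs pvIsAt all k suf) := by
  induction suf with
  | nil => intro k acc; simp [PySem.List.enumerate_nil, pvCtxs]
  | cons w ws ih =>
    intro k acc
    rw [PySem.List.enumerate_cons, List.foldl_cons]
    have hc : (k : Int) + 1 = ((k + 1 : Nat) : Int) := by push_cast; ring
    rw [hc, ih]
    unfold pvStepA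
    by_cases hT : pvIsT w <;> by_cases hA : pvIsAt w <;> simp [hT, hA, pvCtxs]

theorem pvCtxs_len (pred : String → Bool) (all : List String) (suf : List String) : ∀ (k : Nat),
    (pvCtxs pred all k suf).length = suf.countP pred := by
  induction suf with
  | nil => intro k; simp [pvCtxs]
  | cons w ws ih =>
    intro k
    unfold pvCtxs
    by_cases h : pred w <;> simp [h, ih]

theorem pvAfter_eq (pre : List String) (w : String) (ws : List String) :
    pvAfter (pre ++ w :: ws) (pre.length : Int) = ws.take 2 := by
  unfold pvAfter
  have h1 : (pre.length : Int) + 1 = ((pre.length + 1 : Nat) : Int) := by push_cast; ring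
  have h2 : min (((pre ++ w :: ws).length : Nat) : Int) ((pre.length : Int) + 3)
      = ((min (pre ++ w :: ws).length (pre.length + 3) : Nat) : Int) := by
    push_cast; omega
  rw [h1, h2, PySem.List.slice_natCast]
  have hd : (pre ++ w :: ws).drop (pre.length + 1) = ws := by
    rw [← List.drop_drop, List.drop_left]
    simp
  rw [hd, List.take_eq_take_min]
  conv_rhs => rw [List.take_eq_take_min]
  congr 1
  simp only [List.length_append, List.length_cons]
  omega

theorem pvCtxs_afters (pred : String → Bool) (suf : List String) : ∀ (pre : List String),
    ((pvCtxs pred (pre ++ suf) pre.length suf).map (·.2.2)).flatten = pvAfters pred suf := by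
  induction suf with
  | nil => intro pre; simp [pvCtxs, pvAfters]
  | cons w ws ih =>
    intro pre
    have h2 : pvCtxs pred (pre ++ w :: ws) (pre.length + 1) ws
        = pvCtxs pred ((pre ++ [w]) ++ ws) (pre ++ [w]).length ws := by
      rw [List.append_cons]; congr 1; simp
    have h3 := ih (pre ++ [w])
    by_cases h : pred w <;>
      simp only [pvCtxs, pvAfters, h, if_true, if_false, Bool.false_eq_true,
        List.singleton_append, List.map_cons, List.flatten_cons,
        List.nil_append, h2, h3, pvAfter_eq]

theorem pvEv_afters (pred : String → Bool) (suf : List String) : ∀ (p q : Bool),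
    (if q then suf.take 1 else []) ++ (if p then suf.take 2 else []) ++ pvAfters pred suf
      = pvEv pred p q suf := by
  induction suf with
  | nil => intro p q; simp [pvAfters, pvEv]
  | cons w ws ih =>
    intro p q
    unfold pvAfters pvEv
    rw [← ih (pred w) p]
    by_cases hp : p <;> by_cases hq : q <;> simp [hp, hq, List.take_succ_cons]

theorem pvLastTwo (pre : List String) :
    pre.drop (pre.length - 2) = pre.dropLast.getLast?.toList ++ pre.getLast?.toList := by
  induction pre using List.reverseRecOn with
  | nil => rfl
  | append_singleton xs a _ =>
    rcases eq_or_ne xs [] with h | h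
    · subst h; rfl
    · rcases (List.eq_nil_or_concat xs).resolve_left h with ⟨ys, b, rfl⟩
      have : (ys ++ [b] ++ [a]).drop ((ys ++ [b]).length + 1 - 2) = [b, a] := by
        have : ys ++ [b] ++ [a] = ys ++ [b, a] := by simp
        rw [this, show (ys ++ [b]).length + 1 - 2 = ys.length by simp, List.drop_left]
      simp_all

theorem pvWindow_eq (pre suf : List String) :
    pvBefore (pre ++ suf) (pre.length : Int) = pre.drop (pre.length - 2) := by
  unfold pvBefore
  have h1 : max 0 ((pre.length : Int) - 2) = ((pre.length - 2 : Nat) : Int) := by omega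
  rw [h1, PySem.List.slice_natCast, List.drop_append_of_le_length (by omega)]
  have h2 : (pre.drop (pre.length - 2)).length = pre.length - (pre.length - 2) := by simp
  rw [List.take_append_of_le_length (le_of_eq h2.symm), List.take_of_length_le (le_of_eq h2)]

theorem pvWinCount (pred : String → Bool) (pre : List String) :
    (pre.drop (pre.length - 2)).countP pred
      = (if pvFl pred pre.dropLast then 1 else 0) + (if pvFl pred pre then 1 else 0) := by
  rw [pvLastTwo, List.countP_append]
  unfold pvFl
  cases pre.dropLast.getLast? <;> cases pre.getLast? <;>
    simp [List.countP_cons]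
  rfl

-- one step of B: crediting w once per matching predecessor = bumping the per-predecessor events
theorem pvStepB_eq (all : List String) (w : String) (k : Int) (p q pa qa : Bool)
    (st : PySem.Dict String Int × PySem.Dict String Int × Int × Int)
    (hT : (pvBefore all k).countP pvIsT = (if q then 1 else 0) + (if p then 1 else 0))
    (hA : (pvBefore all k).countP pvIsAt = (if qa then 1 else 0) + (if pa then 1 else 0)) :
    pvStepB all st (k, w) =
      (pvBump st.1 ((if q then [w] else []) ++ (if p then [w] else [])),
       pvBump st.2.1 ((if qa then [w] else []) ++ (if pa then [w] else [])),
       st.2.2.1 + (if pvIsT w then 1 else 0), st.2.2.2 + (if pvIsAt w then 1 else 0)) := by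
  cases p <;> cases q <;> cases pa <;> cases qa <;>
    simp_all [pvStepB, pvBump, PySem.Dict.modify, PySem.Dict.getD_insert_self,
      PySem.Dict.insert_insert_self, add_assoc]

theorem pvEv_cons (pred : String → Bool) (p q : Bool) (w : String) (ws : List String) :
    pvEv pred p q (w :: ws)
      = (if q then [w] else []) ++ (if p then [w] else []) ++ pvEv pred (pred w) p ws := rfl

theorem pvB_inner (suf : List String) : ∀ (pre : List String)
    (st : PySem.Dict String Int × PySem.Dict String Int × Int × Int),
    (PySem.List.enumerate suf (pre.length : Int)).foldl (pvStepB (pre ++ suf)) st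
      = (pvBump st.1 (pvEv pvIsT (pvFl pvIsT pre) (pvFl pvIsT pre.dropLast) suf),
         pvBump st.2.1 (pvEv pvIsAt (pvFl pvIsAt pre) (pvFl pvIsAt pre.dropLast) suf),
         st.2.2.1 + (suf.countP pvIsT : Int), st.2.2.2 + (suf.countP pvIsAt : Int)) := by
  induction suf with
  | nil => intro pre st; simp [PySem.List.enumerate_nil, pvEv, pvBump]
  | cons w ws ih =>
    intro pre st
    rw [PySem.List.enumerate_cons, List.foldl_cons]
    have hassoc : pre ++ w :: ws = (pre ++ [w]) ++ ws := by simp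
    have hlen : (pre.length : Int) + 1 = (((pre ++ [w]).length : Nat) : Int) := by
      simp
    have hstep := pvStepB_eq (pre ++ w :: ws) w (pre.length : Int)
      (pvFl pvIsT pre) (pvFl pvIsT pre.dropLast) (pvFl pvIsAt pre) (pvFl pvIsAt pre.dropLast) st
      (by rw [pvWindow_eq pre (w :: ws)]; exact pvWinCount pvIsT pre)
      (by rw [pvWindow_eq pre (w :: ws)]; exact pvWinCount pvIsAt pre)
    rw [hstep, hlen, hassoc, ih (pre ++ [w])]
    simp only [List.dropLast_concat, pvFl, List.getLast?_concat, Option.map_some,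
      Option.getD_some]
    simp only [pvEv_cons, pvBump, List.foldl_append, List.countP_cons, Prod.mk.injEq]
    refine ⟨rfl, rfl, ?_, ?_⟩ <;> · push_cast; split <;> ring

theorem pvBump_ctxfold (l : List (String × List String × List String))
    (d : PySem.Dict String Int) :
    l.foldl (fun d c => pvBump d c.2.2) d = pvBump d ((l.map (·.2.2)).flatten) := by
  induction l generalizing d with
  | nil => rfl
  | cons c cs ih =>
    simp only [List.foldl_cons, List.map_cons, List.flatten_cons]
    rw [ih]
    unfold pvBump
    rw [List.foldl_append]

theorem pvTrans_abs
    (acc : List (String × List String × List String) × List (String × List String × List String))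
    (trans : List (String × String)) :
    pvTransB (pvAbs acc) trans = pvAbs (pvTransA acc trans) := by
  unfold pvTransA pvTransB
  cases (PySem.Dict.ofList trans).get? "final_translation" with
  | none => rfl
  | some s =>
    show (PySem.List.enumerate (PySem.Str.split₀ s) 0).foldl
          (pvStepB (PySem.Str.split₀ s)) (pvAbs acc)
        = pvAbs ((PySem.List.enumerate (PySem.Str.split₀ s) 0).foldl
          (pvStepA (PySem.Str.split₀ s)) acc)
    have hA := pvA_inner (PySem.Str.split₀ s) (PySem.Str.split₀ s) 0 acc
    have hB := pvB_inner (PySem.Str.split₀ s) [] (pvAbs acc)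
    norm_num at hA hB
    rw [hA, hB]
    have hc1 := pvCtxs_afters pvIsT (PySem.Str.split₀ s) []
    have hc2 := pvCtxs_afters pvIsAt (PySem.Str.split₀ s) []
    norm_num at hc1 hc2
    have he1 : pvAfters pvIsT (PySem.Str.split₀ s)
        = pvEv pvIsT false false (PySem.Str.split₀ s) := by
      have := pvEv_afters pvIsT (PySem.Str.split₀ s) false false; simpa using this
    have he2 : pvAfters pvIsAt (PySem.Str.split₀ s)
        = pvEv pvIsAt false false (PySem.Str.split₀ s) := by
      have := pvEv_afters pvIsAt (PySem.Str.split₀ s) false false; simpa using this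
    unfold pvAbs
    simp only [List.foldl_append, List.length_append, pvBump_ctxfold, hc1, hc2, he1, he2,
      pvCtxs_len, pvFl, List.getLast?_nil, Option.map_none, Option.getD_none,
      Prod.mk.injEq]
    refine ⟨trivial, trivial, ?_, ?_⟩ <;> · push_cast; ring

theorem pvOuter_abs (translations : List (List (String × String)))
    (acc : List (String × List String × List String) × List (String × List String × List String)) :
    translations.foldl pvTransB (pvAbs acc) = pvAbs (translations.foldl pvTransA acc) := by
  induction translations generalizing acc with
  | nil => rfl
  | cons t ts ih => simp only [List.foldl_cons, pvTrans_abs]; exact ih _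

-- ===== VERDICT (by name: the statement is the Claim_ definition above) =====
theorem compare_with_at_in_spec : Claim_equal_compare_with_at_in := by
  intro translations _ _
  unfold Spec_compare_with_at_in compare_with_at_in compare_with_at_in_alt
  have h : translations.foldl pvTransB (PySem.Dict.empty, PySem.Dict.empty, 0, 0)
      = pvAbs (translations.foldl pvTransA ([], [])) := by
    have := pvOuter_abs translations ([], [])
    simpa [pvAbs] using this
  simp only [h, pvAbs]
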